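-- pv_equiv track=rewrite | github.com/KIRITO-AR/questionbankscrapper | capture_khan_simple.py | expand_to_complete_json
-- ===== SOURCE A (Python) =====
-- def expand_to_complete_json(content, start, length):
--     """Try to expand a JSON fragment to complete JSON."""
--     # Simple approach: find balanced braces
--     end = start + length
--     open_braces = content[:end].count('{') - content[:end].count('}')
--
--     # Expand forward to balance braces
--     pos = end
--     while pos < len(content) and open_braces > 0:
--         if content[pos] == '{':
--             open_braces += 1
--         elif content[pos] == '}':
--             open_braces -= 1
--         pos += 1
--
--     if open_braces == 0:
--         return content[start:pos]
--     return None
-- ===== SOURCE B (Python) =====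
-- def expand_to_complete_json(content, start, length):
--     """Try to expand a JSON fragment to complete JSON.
--
--     Sparse approach: build the list of brace events (index, +1/-1) once,
--     take the prefix depth as a sum over events before the fragment end, and
--     walk only the brace events past the end to find where depth returns to 0.
--     """
--     end = start + length
--     events = [(i, 1 if c == '{' else -1) for i, c in enumerate(content) if c in '{}']
--     depth = sum(d for i, d in events if i < end)
--     if depth == 0:
--         return content[start:end]
--     if depth < 0:
--         return None
--     for i, d in events:
--         if i >= end:
--             depth += d
--             if depth == 0:
--                 return content[start:i + 1]
--     return None
-- ===== Notes on version B (the rewrite author's own statement) =====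
-- stated objective: alternative
-- what changed: Instead of A's whole-prefix .count() scans plus a character-by-character forward loop, B builds a sparse list of brace events (index, +1/-1) once, takes the prefix depth as a sum over events before the fragment end, and walks only the brace events past the end to find where the depth returns to zero.
-- outside the precondition, e.g. on expand_to_complete_json('{{}}{{{', 0, -5): A returns '{{}}', B returns '{{'; on expand_to_complete_json('a}a{{', -2, 0): A returns None, B returns ''
import Mathlib
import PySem

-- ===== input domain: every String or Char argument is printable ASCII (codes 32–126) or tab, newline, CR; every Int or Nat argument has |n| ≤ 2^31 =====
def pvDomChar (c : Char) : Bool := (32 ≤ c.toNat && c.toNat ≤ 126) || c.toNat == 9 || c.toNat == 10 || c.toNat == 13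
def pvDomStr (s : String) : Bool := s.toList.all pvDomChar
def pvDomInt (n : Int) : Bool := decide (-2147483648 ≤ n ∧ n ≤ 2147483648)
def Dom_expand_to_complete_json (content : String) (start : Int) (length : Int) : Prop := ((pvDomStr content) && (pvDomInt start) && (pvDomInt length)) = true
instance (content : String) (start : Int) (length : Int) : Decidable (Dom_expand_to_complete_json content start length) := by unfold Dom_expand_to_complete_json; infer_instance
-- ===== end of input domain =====

-- B replaces A's whole-prefix .count() scans plus its per-character forward loop by a sparse
-- list of brace events walked once (objective: alternative decomposition, same O(n) cost).

-- ===== PORT A =====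
-- A's forward loop: 'pos = end; while pos < len(content) and open_braces > 0: …'
def pvALoop (cs : List Char) (pos : Int) (opn : Int) : Int × Int :=
  if h : pos < (cs.length : Int) ∧ 0 < opn then
    match PySem.List.pyGet? cs pos with
    | some c => pvALoop cs (pos + 1) (if c = '{' then opn + 1 else if c = '}' then opn - 1 else opn)
    | none => (pos, opn)  -- Python IndexError (pos < -len); unreachable for pos ≥ 0, which Pre_ ensures
  else (pos, opn)
termination_by ((cs.length : Int) - pos).toNat
decreasing_by omega

def expand_to_complete_json (content : String) (start : Int) (length : Int) : Option String :=
  let endI := start + length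
  let pre := PySem.Str.slice content none (some endI)
  let opn : Int := (PySem.Str.count pre "{" : Int) - (PySem.Str.count pre "}" : Int)
  let r := pvALoop content.toList endI opn
  if r.2 = 0 then some (PySem.Str.slice content (some start) (some r.1)) else none

-- ===== PORT B =====
-- B's event list: '[(i, 1 if c == '{' else -1) for i, c in enumerate(content) if c in '{}']'
def pvEvents (cs : List Char) : List (Int × Int) :=
  ((PySem.List.enumerate cs).filter (fun p => p.2 == '{' || p.2 == '}')).map
    (fun p => (p.1, if p.2 = '{' then (1 : Int) else -1))

-- B's 'for i, d in events: if i >= end: …' loop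
def pvBScan (endI : Int) : List (Int × Int) → Int → Option Int
  | [], _ => none
  | (i, d) :: rest, depth =>
      if endI ≤ i then
        if depth + d = 0 then some (i + 1) else pvBScan endI rest (depth + d)
      else pvBScan endI rest depth

def expand_to_complete_json_alt (content : String) (start : Int) (length : Int) : Option String :=
  let endI := start + length
  let events := pvEvents content.toList
  let depth : Int := ((events.filter (fun e => decide (e.1 < endI))).map Prod.snd).sum
  if depth = 0 then some (PySem.Str.slice content (some start) (some endI))
  else if depth < 0 then none
  else
    match pvBScan endI events depth with
    | some p => some (PySem.Str.slice content (some start) (some p))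
    | none => none

-- ===== PRECONDITION & SPEC =====
-- Pre_ excludes a negative fragment end (start + length < 0): outside the natural domain
-- of a fragment position, where A's value is an accident of Python's negative-slice
-- clamping and negative-index wraparound in its forward scan.
def Pre_expand_to_complete_json (content : String) (start : Int) (length : Int) : Prop :=
  0 ≤ start + length
instance (content : String) (start : Int) (length : Int) : Decidable (Pre_expand_to_complete_json content start length) := by unfold Pre_expand_to_complete_json; infer_instance

def pvWitness_expand_to_complete_json : String × Int × Int := ("x{\"a\": 1}", 1, 3)

def Spec_expand_to_complete_json (content : String) (start : Int) (length : Int) (out : Option String) : Prop := out = expand_to_complete_json_alt content start length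
instance (content : String) (start : Int) (length : Int) (out : Option String) : Decidable (Spec_expand_to_complete_json content start length out) := by unfold Spec_expand_to_complete_json; infer_instance

-- ===== CLAIM (what is proved, stated in full; the proofs are below) =====
def Claim_equal_expand_to_complete_json : Prop := ∀ (content : String) (start : Int) (length : Int), Dom_expand_to_complete_json content start length → Pre_expand_to_complete_json content start length → Spec_expand_to_complete_json content start length (expand_to_complete_json content start length)

-- ===== LEMMAS AND PROOFS =====

-- brace-depth step and its fold (the common semantics of the prefix balance)
def pvStep (d : Int) (c : Char) : Int :=
  if c = '{' then d + 1 else if c = '}' then d - 1 else d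

def pvBal (l : List Char) (d : Int) : Int := l.foldl pvStep d

-- recursive characterization of B's event list (proof helper only)
def evRec : Nat → List Char → List (Int × Int)
  | _, [] => []
  | j, c :: t =>
      if c = '{' then ((j : Int), 1) :: evRec (j + 1) t
      else if c = '}' then ((j : Int), -1) :: evRec (j + 1) t
      else evRec (j + 1) t

lemma pvCountGo_singleton (c : Char) : ∀ (fuel : Nat) (l : List Char) (acc : Nat),
    l.length ≤ fuel → PySem.Chars.count.go [c] fuel l acc = acc + l.count c := by
  intro fuel
  induction fuel with
  | zero => intro l acc h; cases l with
    | nil => simp [PySem.Chars.count.go]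
    | cons x t => simp at h
  | succ f ih =>
    intro l acc h
    cases l with
    | nil => simp [PySem.Chars.count.go]
    | cons x t =>
      simp only [PySem.Chars.count.go]
      by_cases hx : x = c
      · subst hx
        have : List.isPrefixOf [x] (x :: t) = true := by simp [List.isPrefixOf]
        simp only [this, if_true]
        simp only [List.length_cons, List.length_nil, Nat.zero_add, List.drop_succ_cons, List.drop_zero]
        rw [ih t (acc + 1) (by simpa using Nat.lt_succ_iff.mp (by simpa using h))]
        simp [List.count_cons]
        omega
      · have : List.isPrefixOf [c] (x :: t) = false := by
          simp [List.isPrefixOf]; exact fun hc => (hx hc.symm).elim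
        simp only [this]
        rw [ih t acc (by simpa using Nat.lt_succ_iff.mp (by simpa using h))]
        simp [List.count_cons, hx]

lemma pvCountChar (l : List Char) (c : Char) : PySem.Chars.count l [c] = l.count c := by
  simp [PySem.Chars.count]
  simpa using pvCountGo_singleton c l.length l 0 le_rfl

lemma pvBal_eq_counts (l : List Char) (d : Int) :
    pvBal l d = d + (l.count '{' : Int) - (l.count '}' : Int) := by
  induction l generalizing d with
  | nil => simp [pvBal]
  | cons x t ih =>
    simp only [pvBal, List.foldl_cons] at *
    rw [ih]
    by_cases h1 : x = '{'
    · simp [pvStep, h1, List.count_cons]; omega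
    · by_cases h2 : x = '}'
      · simp [pvStep, h1, h2, List.count_cons]; omega
      · simp [pvStep, h1, h2, List.count_cons]

lemma pvBal_cons (c : Char) (l : List Char) :
    pvBal (c :: l) 0 = pvStep 0 c + pvBal l 0 := by
  rw [pvBal_eq_counts, pvBal_eq_counts]
  by_cases h1 : c = '{'
  · simp [pvStep, h1, List.count_cons]; omega
  · by_cases h2 : c = '}'
    · simp [pvStep, h1, h2, List.count_cons]; omega
    · simp [pvStep, h1, h2, List.count_cons]

-- the prefix balance A computes via the two .count() scans
lemma pvOpn_eq_bal (content : String) (endI : Int) (h : 0 ≤ endI) :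
    ((PySem.Str.count (PySem.Str.slice content none (some endI)) "{" : Int)
      - (PySem.Str.count (PySem.Str.slice content none (some endI)) "}" : Int))
    = pvBal (content.toList.take endI.toNat) 0 := by
  have hsl : (PySem.Str.slice content none (some endI)).toList = content.toList.take endI.toNat := by
    simp [PySem.Str.toList_slice]
    rw [PySem.List.slice_to _ h]
  have hc1 : PySem.Str.count (PySem.Str.slice content none (some endI)) "{"
      = (content.toList.take endI.toNat).count '{' := by
    rw [PySem.Str.count_eq, hsl]; exact pvCountChar _ _
  have hc2 : PySem.Str.count (PySem.Str.slice content none (some endI)) "}"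
      = (content.toList.take endI.toNat).count '}' := by
    rw [PySem.Str.count_eq, hsl]; exact pvCountChar _ _
  rw [hc1, hc2, pvBal_eq_counts]
  ring

-- B's comprehension equals evRec
lemma pvEvents_eq_evRec_gen : ∀ (cs : List Char) (j : Nat),
    ((PySem.List.enumerate cs (j : Int)).filter (fun p => p.2 == '{' || p.2 == '}')).map
      (fun p => (p.1, if p.2 = '{' then (1 : Int) else -1)) = evRec j cs := by
  intro cs
  induction cs with
  | nil => intro j; simp [PySem.List.enumerate_nil, evRec]
  | cons c t ih =>
    intro j
    rw [PySem.List.enumerate_cons, List.filter_cons]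
    have hj1 : (j : Int) + 1 = ((j + 1 : Nat) : Int) := by push_cast; ring
    rw [evRec]
    by_cases h1 : c = '{'
    · subst h1
      simp
      rw [hj1]; exact ih _
    · by_cases h2 : c = '}'
      · subst h2
        simp [h1]
        rw [hj1]; exact ih _
      · simp [h1, h2]
        rw [hj1]; exact ih _

lemma pvEvents_eq_evRec (cs : List Char) : pvEvents cs = evRec 0 cs := by
  have := pvEvents_eq_evRec_gen cs 0
  simpa [pvEvents] using this

-- B's prefix-depth sum equals the brace balance of the prefix
lemma ev_prefix_sum : ∀ (cs : List Char) (j : Nat) (endI : Int),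
    (((evRec j cs).filter (fun e => decide (e.1 < endI))).map Prod.snd).sum
      = pvBal (cs.take (endI - j).toNat) 0 := by
  intro cs
  induction cs with
  | nil => intro j endI; simp [evRec, pvBal]
  | cons c t ih =>
    intro j endI
    have hrest := ih (j + 1) endI
    by_cases hje : (j : Int) < endI
    · have htake2 : ((c :: t).take ((endI - j).toNat)) = c :: t.take ((endI - ((j:Nat) + 1 : Nat)).toNat) := by
        have h1 : (endI - j).toNat = ((endI - ((j:Nat) + 1 : Nat)).toNat) + 1 := by push_cast; omega
        rw [h1, List.take_succ_cons]
      rw [htake2, pvBal_cons, ← hrest]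
      by_cases h1 : c = '{'
      · rw [evRec, if_pos h1, List.filter_cons, if_pos (by simpa using hje)]
        simp [pvStep, h1]
      · by_cases h2 : c = '}'
        · rw [evRec, if_neg h1, if_pos h2, List.filter_cons, if_pos (by simpa using hje)]
          simp [pvStep, h1, h2]
        · rw [evRec, if_neg h1, if_neg h2]
          simp [pvStep, h1, h2]
    · have htake : (endI - j).toNat = 0 := by omega
      have htake2 : (endI - ((j:Nat) + 1 : Nat)).toNat = 0 := by push_cast; omega
      rw [htake]
      rw [htake2] at hrest
      by_cases h1 : c = '{'
      · rw [evRec, if_pos h1, List.filter_cons, if_neg (by simpa using hje)]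
        simpa using hrest
      · by_cases h2 : c = '}'
        · rw [evRec, if_neg h1, if_pos h2, List.filter_cons, if_neg (by simpa using hje)]
          simpa using hrest
        · rw [evRec, if_neg h1, if_neg h2]
          simpa using hrest

lemma pvALoop_stuck (cs : List Char) (j d : Int) (h : ¬ (j < (cs.length : Int) ∧ 0 < d)) :
    pvALoop cs j d = (j, d) := by
  rw [pvALoop, dif_neg h]

-- B's loop skips every event strictly before endI without touching depth
lemma pvBScan_skip (endI : Int) : ∀ (u v : List Char) (j : Nat) (d : Int),
    ((j : Int) + u.length) ≤ endI →
    pvBScan endI (evRec j (u ++ v)) d = pvBScan endI (evRec (j + u.length) v) d := by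
  intro u
  induction u with
  | nil => intro v j d _; simp
  | cons c u' ih =>
    intro v j d hle
    have hjlt : ¬ endI ≤ (j : Int) := by
      simp only [List.length_cons] at hle
      push_cast at hle
      omega
    have hlen : ((j + 1 : Nat) : Int) + u'.length ≤ endI := by
      simp only [List.length_cons] at hle; push_cast at hle ⊢; omega
    have harr : j + (c :: u').length = (j + 1) + u'.length := by simp; omega
    rw [harr, List.cons_append, ← ih v (j + 1) d hlen]
    by_cases h1 : c = '{'
    · rw [evRec, if_pos h1, pvBScan, if_neg hjlt]
    · by_cases h2 : c = '}'
      · rw [evRec, if_neg h1, if_pos h2, pvBScan, if_neg hjlt]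
      · rw [evRec, if_neg h1, if_neg h2]

lemma pvALoop_step (cs : List Char) (j : Nat) (d : Int) (c : Char)
    (hj : j < cs.length) (hd : 0 < d) (hget : cs[j] = c) :
    pvALoop cs (j : Int) d
      = pvALoop cs ((j : Int) + 1) (if c = '{' then d + 1 else if c = '}' then d - 1 else d) := by
  have hpy : PySem.List.pyGet? cs (j : Int) = some c := by
    simp [PySem.List.pyGet?, PySem.List.pyIdx?, hj, hget]
  rw [pvALoop, dif_pos ⟨by push_cast; omega, hd⟩, hpy]

lemma pvBScan_eq_ALoop (cs : List Char) (endI : Int) :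
    ∀ (t : List Char) (j : Nat) (d : Int), 0 < d → endI ≤ (j : Int) → cs.drop j = t →
    pvBScan endI (evRec j t) d
      = (if (pvALoop cs (j : Int) d).2 = 0 then some (pvALoop cs (j : Int) d).1 else none) := by
  intro t
  induction t with
  | nil =>
    intro j d hd hj hdrop
    have hlen : cs.length ≤ j := by
      have := congrArg List.length hdrop
      simp at this
      omega
    rw [pvALoop_stuck cs j d (by push_cast; omega)]
    simp [evRec, pvBScan]
    omega
  | cons c t' ih =>
    intro j d hd hj hdrop
    have hjlt : j < cs.length := by
      have := congrArg List.length hdrop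
      simp at this
      omega
    have hget : cs[j] = c := by
      have h0 : (cs.drop j)[0]'(by rw [hdrop]; simp) = c := by
        simp [hdrop]
      rw [List.getElem_drop] at h0
      simpa using h0
    have hdrop' : cs.drop (j + 1) = t' := by
      have h1 : cs.drop (j + 1) = (cs.drop j).drop 1 := by rw [List.drop_drop]
      rw [h1, hdrop]
      simp
    have hcast : (j : Int) + 1 = ((j + 1 : Nat) : Int) := by push_cast; ring
    rw [pvALoop_step cs j d c hjlt hd hget]
    by_cases h1 : c = '{'
    · rw [evRec, if_pos h1, pvBScan, if_pos hj, if_neg (by omega : ¬ d + 1 = 0)]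
      rw [if_pos h1]
      rw [hcast, ih (j + 1) (d + 1) (by omega) (by push_cast; omega) hdrop']
    · by_cases h2 : c = '}'
      · rw [evRec, if_neg h1, if_pos h2, pvBScan, if_pos hj]
        rw [if_neg h1, if_pos h2]
        by_cases hz : d + (-1) = 0
        · rw [if_pos hz]
          have hd0 : d - 1 = 0 := by omega
          rw [hcast, pvALoop_stuck cs ((j + 1 : Nat) : Int) (d - 1) (by omega)]
          simp [hd0]
        · rw [if_neg hz]
          have he : d + (-1) = d - 1 := by ring
          rw [he, hcast, ih (j + 1) (d - 1) (by omega) (by push_cast; omega) hdrop']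
      · rw [evRec, if_neg h1, if_neg h2, if_neg h1, if_neg h2]
        rw [hcast, ih (j + 1) d hd (by push_cast; omega) hdrop']

-- ===== VERDICT (by name: the statement is the Claim_ definition above) =====
theorem expand_to_complete_json_spec : Claim_equal_expand_to_complete_json := by
  intro content start length _hdom hpre
  unfold Spec_expand_to_complete_json
  unfold expand_to_complete_json expand_to_complete_json_alt
  dsimp only
  set cs := content.toList with hcs
  set endI := start + length with hend
  have hend0 : 0 ≤ endI := hpre
  rw [pvOpn_eq_bal content endI hend0, pvEvents_eq_evRec]
  rw [ev_prefix_sum cs 0 endI]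
  simp only [Nat.cast_zero, sub_zero]
  set D := pvBal (cs.take endI.toNat) 0 with hD
  by_cases hD0 : D = 0
  · rw [pvALoop_stuck cs endI D (by omega)]
    simp [hD0]
  · by_cases hDneg : D < 0
    · rw [pvALoop_stuck cs endI D (by omega)]
      simp [hD0, hDneg]
    · have hDpos : 0 < D := by omega
      rw [if_neg hD0, if_neg hDneg]
      -- split the event list at m = min endI.toNat cs.length
      set m := min endI.toNat cs.length with hm
      have hsplit : cs = cs.take m ++ cs.drop m := (List.take_append_drop m cs).symm
      have htklen : (cs.take m).length = m := by
        simp [hm]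
      have hskip : pvBScan endI (evRec 0 cs) D = pvBScan endI (evRec m (cs.drop m)) D := by
        conv_lhs => rw [hsplit]
        have := pvBScan_skip endI (cs.take m) (cs.drop m) 0 D
          (by rw [htklen]; push_cast; omega)
        rw [this, htklen]
        simp
      rw [hskip]
      by_cases hle : endI ≤ (cs.length : Int)
      · have hmE : m = endI.toNat := by omega
        have hmI : (m : Int) = endI := by omega
        rw [pvBScan_eq_ALoop cs endI (cs.drop m) m D hDpos (by omega) rfl, hmI]
        by_cases hz : (pvALoop cs endI D).2 = 0
        · simp [hz]
        · simp [hz]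
      · have hmL : m = cs.length := by omega
        have hdropnil : cs.drop m = [] := by simp [hmL]
        rw [hdropnil]
        rw [pvALoop_stuck cs endI D (by omega)]
        simp [evRec, pvBScan, hD0]
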